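-- pv_equiv track=rewrite | github.com/Blankpaperlab/stagingPlatform | sdk/python/tests/test_parity.py | select_headers
-- ===== SOURCE A (Python) =====
-- from typing import Any, Iterator
--
-- def select_headers(
--     headers: dict[str, Any] | None,
--     allowed: tuple[str, ...],
-- ) -> dict[str, list[str]]:
--     if not headers:
--         return {}
--
--     selected: dict[str, list[str]] = {}
--     for name in allowed:
--         value = headers.get(name)
--         if value is None:
--             continue
--         selected[name] = [str(item) for item in value]
--     return selected
-- ===== SOURCE B (Python) =====
-- def select_headers(headers, allowed):
--     if not headers:
--         return {}
--
--     rank: dict[str, int] = {}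
--     for i, name in enumerate(allowed):
--         if name not in rank:
--             rank[name] = i
--
--     picked = [
--         (rank[name], name, [str(item) for item in value])
--         for name, value in headers.items()
--         if name in rank
--     ]
--     picked.sort(key=lambda entry: entry[0])
--     return {name: values for _, name, values in picked}
-- ===== Notes on version B (the rewrite author's own statement) =====
-- stated objective: alternative
-- what changed: B drives the traversal from the headers dict (filtering by a first-occurrence rank map built from allowed, then a stable sort by rank restores allowed order) instead of probing the dict once per allowed name.
import Mathlib
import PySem

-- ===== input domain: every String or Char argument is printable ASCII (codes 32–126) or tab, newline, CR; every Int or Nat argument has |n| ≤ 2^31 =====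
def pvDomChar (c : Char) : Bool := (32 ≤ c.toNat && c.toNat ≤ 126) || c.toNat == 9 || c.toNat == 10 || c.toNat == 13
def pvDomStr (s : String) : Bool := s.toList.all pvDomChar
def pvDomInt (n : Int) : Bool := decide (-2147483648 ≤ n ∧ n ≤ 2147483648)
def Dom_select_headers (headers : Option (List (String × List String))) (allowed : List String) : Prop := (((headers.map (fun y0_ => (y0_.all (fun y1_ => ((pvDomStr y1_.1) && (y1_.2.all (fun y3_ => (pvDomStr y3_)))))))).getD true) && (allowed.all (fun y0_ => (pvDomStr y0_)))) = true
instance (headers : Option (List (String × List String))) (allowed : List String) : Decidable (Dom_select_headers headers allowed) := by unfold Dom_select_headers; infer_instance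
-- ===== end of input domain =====

-- B selects from the headers side (first-occurrence rank map over allowed, filter of the header
-- items, stable sort by rank restoring allowed order) instead of probing the dict per allowed name.

-- ===== PORT A =====
def select_headers (headers : Option (List (String × List String))) (allowed : List String) : List (String × List String) :=
  match headers with
  | none => []
  | some hs =>
    if hs.isEmpty then [] else
      (allowed.foldl (fun selected name =>
        match (PySem.Dict.mk hs).get? name with
        | none => selected
        | some value => selected.insert name (value.map (fun item => item)))
        PySem.Dict.empty).items

-- ===== PORT B =====
def select_headers_alt (headers : Option (List (String × List String))) (allowed : List String) : List (String × List String) :=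
  match headers with
  | none => []
  | some hs =>
    if hs.isEmpty then [] else
      let rank : PySem.Dict String Int :=
        (PySem.List.enumerate allowed).foldl
          (fun r p => if r.contains p.2 then r else r.insert p.2 p.1) PySem.Dict.empty
      let picked : List (Int × String × List String) :=
        hs.filterMap (fun kv =>
          match rank.get? kv.1 with
          | some i => some (i, kv.1, kv.2.map (fun item => item))
          | none => none)
      let sortedPicked := PySem.List.sorted picked (fun entry => entry.1) false
      (sortedPicked.foldl (fun d entry => d.insert entry.2.1 entry.2.2) PySem.Dict.empty).items

-- ===== PRECONDITION & SPEC =====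
-- The Lean type admits association lists with duplicate header names, which a Python dict argument
-- can never present; Pre_ excludes exactly those impossible inputs (every real input satisfies it).
def Pre_select_headers (headers : Option (List (String × List String))) (allowed : List String) : Prop :=
  ((headers.getD []).map Prod.fst).Nodup

instance (headers : Option (List (String × List String))) (allowed : List String) : Decidable (Pre_select_headers headers allowed) := by unfold Pre_select_headers; infer_instance

def pvWitness_select_headers : (Option (List (String × List String))) × List String :=
  (some [("a", ["1"]), ("b", ["2", "3"])], ["b", "a", "b"])

def Spec_select_headers (headers : Option (List (String × List String))) (allowed : List String) (out : List (String × List String)) : Prop := out = select_headers_alt headers allowed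
instance (headers : Option (List (String × List String))) (allowed : List String) (out : List (String × List String)) : Decidable (Spec_select_headers headers allowed out) := by unfold Spec_select_headers; infer_instance

-- ===== CLAIM (what is proved, stated in full; the proofs are below) =====
def Claim_equal_select_headers : Prop := ∀ (headers : Option (List (String × List String))) (allowed : List String), Dom_select_headers headers allowed → Pre_select_headers headers allowed → Spec_select_headers headers allowed (select_headers headers allowed)

-- ===== LEMMAS AND PROOFS =====

-- Common spec walk: process the enumerated allowed list left to right, skipping seen or absent
-- names, emitting (rank, name, value) at each first hit.
def shGo (g : String → Option (List String)) : List String → List (Int × String) → List (Int × String × List String)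
  | _, [] => []
  | seen, (i, n) :: rest =>
    if n ∈ seen then shGo g seen rest
    else match g n with
      | none => shGo g seen rest
      | some v => (i, n, v) :: shGo g (n :: seen) rest

-- first rank of a name in an enumerated list
def frank : List (Int × String) → String → Option Int
  | [], _ => none
  | (i, n) :: rest, m => if n = m then some i else frank rest m

theorem map_ident (l : List String) : l.map (fun item => item) = l := by
  induction l with
  | nil => rfl
  | cons a t ih => simp only [List.map_cons, ih]

theorem shGo_congr (g : String → Option (List String)) (l : List (Int × String)) :
    ∀ (s1 s2 : List String), (∀ x, x ∈ s1 ↔ x ∈ s2) → shGo g s1 l = shGo g s2 l := by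
  induction l with
  | nil => intro s1 s2 _; rfl
  | cons p rest ih =>
    intro s1 s2 h
    obtain ⟨i, n⟩ := p
    by_cases hn : n ∈ s1
    · simp only [shGo, if_pos hn, if_pos ((h n).mp hn)]
      exact ih s1 s2 h
    · simp only [shGo, if_neg hn, if_neg (fun hx => hn ((h n).mpr hx))]
      cases hg : g n with
      | none => exact ih s1 s2 h
      | some v => exact congrArg _ (ih (n :: s1) (n :: s2) (fun x => by simp [h x]))

theorem insert_eq_self {κ ν : Type} [BEq κ] [LawfulBEq κ] (d : PySem.Dict κ ν) (k : κ) (v : ν)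
    (hnd : d.keys.Nodup) (h : d.get? k = some v) : d.insert k v = d := by
  have hc : d.contains k = true := by
    rw [PySem.Dict.contains_eq_isSome_get?, h]; rfl
  apply PySem.Dict.ext
  rw [PySem.Dict.items_insert_of_contains _ _ hc]
  conv_rhs => rw [← List.map_id d.items]
  apply List.map_congr_left
  intro p hp
  obtain ⟨p1, p2⟩ := p
  by_cases hk : p1 = k
  · subst hk
    have hget : d.get? p1 = some p2 := PySem.Dict.get?_of_mem_items d hp hnd
    have hv : p2 = v := by
      have := hget.symm.trans h
      injection this
    simp [hv]
  · simp [hk]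

theorem A_loop (g : String → Option (List String)) (l : List String) (s : Int)
    (d : PySem.Dict String (List String)) (hnd : d.keys.Nodup)
    (hag : ∀ p ∈ d.items, g p.1 = some p.2) :
    (l.foldl (fun sel name =>
        match g name with
        | none => sel
        | some value => sel.insert name value) d).items
      = d.items ++ (shGo g d.keys (PySem.List.enumerate l s)).map (·.2) := by
  induction l generalizing d s with
  | nil => simp [PySem.List.enumerate_nil, shGo]
  | cons n rest ih =>
    simp only [PySem.List.enumerate_cons, List.foldl_cons]
    cases hg : g n with
    | none =>
      have hsh : shGo g d.keys ((s, n) :: PySem.List.enumerate rest (s + 1))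
          = shGo g d.keys (PySem.List.enumerate rest (s + 1)) := by
        by_cases hn : n ∈ d.keys
        · simp only [shGo, if_pos hn]
        · simp only [shGo, if_neg hn, hg]
      rw [hsh]
      exact ih (s + 1) d hnd hag
    | some v =>
      by_cases hn : n ∈ d.keys
      · -- n already a key: the overwrite is a no-op
        cases hv' : d.get? n with
        | none => exact absurd hn (fun _ => (PySem.Dict.get?_eq_none_iff_not_mem_keys d n).mp hv' hn)
        | some v' =>
          have hvv : v' = v := by
            have h1 : g n = some v' := hag (n, v') (PySem.Dict.mem_items_of_get?_eq_some d hv')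
            have h2 := h1.symm.trans hg
            injection h2
          have hins : d.insert n v = d := by
            rw [← hvv]
            exact insert_eq_self d n v' hnd hv'
          have hsh : shGo g d.keys ((s, n) :: PySem.List.enumerate rest (s + 1))
              = shGo g d.keys (PySem.List.enumerate rest (s + 1)) := by
            simp only [shGo, if_pos hn]
          rw [hsh]
          show (List.foldl (fun sel name =>
              match g name with
              | none => sel
              | some value => sel.insert name value) (d.insert n v) rest).items
            = d.items ++ (shGo g d.keys (PySem.List.enumerate rest (s + 1))).map (·.2)
          rw [hins]
          exact ih (s + 1) d hnd hag
      · have hfresh : d.contains n = false := by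
          cases hcon : d.contains n with
          | false => rfl
          | true => exact absurd ((PySem.Dict.contains_iff_mem_keys d n).mp hcon) hn
        have hnd' : (d.insert n v).keys.Nodup := PySem.Dict.nodup_keys_insert d n v hnd
        have hag' : ∀ p ∈ (d.insert n v).items, g p.1 = some p.2 := by
          intro p hp
          rw [PySem.Dict.items_insert_of_not_contains _ _ hfresh] at hp
          rcases List.mem_append.mp hp with h1 | h1
          · exact hag p h1
          · simp only [List.mem_singleton] at h1
            subst h1
            exact hg
        have hsh : shGo g d.keys ((s, n) :: PySem.List.enumerate rest (s + 1))
            = (s, n, v) :: shGo g (n :: d.keys) (PySem.List.enumerate rest (s + 1)) := by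
          simp only [shGo, if_neg hn, hg]
        rw [hsh]
        show (List.foldl (fun sel name =>
            match g name with
            | none => sel
            | some value => sel.insert name value) (d.insert n v) rest).items
          = d.items ++ ((s, n, v) :: shGo g (n :: d.keys) (PySem.List.enumerate rest (s + 1))).map (·.2)
        rw [ih (s + 1) (d.insert n v) hnd' hag']
        rw [PySem.Dict.items_insert_of_not_contains _ _ hfresh]
        rw [PySem.Dict.keys_insert_of_not_contains _ _ hfresh]
        rw [shGo_congr g (PySem.List.enumerate rest (s + 1)) (d.keys ++ [n]) (n :: d.keys)
          (by intro x; simp [or_comm])]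
        simp [List.append_assoc]

theorem rank_get (l : List (Int × String)) :
    ∀ (d : PySem.Dict String Int) (m : String),
    (l.foldl (fun r p => if r.contains p.2 then r else r.insert p.2 p.1) d).get? m
      = match d.get? m with
        | some v => some v
        | none => frank l m := by
  induction l with
  | nil =>
    intro d m
    simp only [List.foldl_nil]
    cases d.get? m <;> rfl
  | cons p rest ih =>
    intro d m
    obtain ⟨i, n⟩ := p
    simp only [List.foldl_cons]
    by_cases hc : d.contains n = true
    · rw [if_pos hc, ih d m]
      cases hdm : d.get? m with
      | some v => rfl
      | none =>
        have hnm : n ≠ m := by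
          rintro rfl
          rw [PySem.Dict.contains_eq_isSome_get?, hdm] at hc
          exact Bool.noConfusion hc
        simp only [frank, if_neg hnm]
    · rw [if_neg hc, ih (d.insert n i) m]
      have hdn : d.get? n = none := by
        cases hg : d.get? n with
        | none => rfl
        | some w =>
          exfalso
          apply hc
          rw [PySem.Dict.contains_eq_isSome_get?, hg]
          rfl
      by_cases hm : m = n
      · subst hm
        rw [PySem.Dict.get?_insert_self, hdn]
        simp [frank]
      · rw [PySem.Dict.get?_insert_of_ne _ _ hm]
        cases hdm : d.get? m with
        | some v => rfl
        | none => simp only [frank, if_neg (fun h : n = m => hm h.symm)]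

theorem frank_isSome (l : List (Int × String)) (m : String) :
    (frank l m).isSome ↔ m ∈ l.map (·.2) := by
  induction l with
  | nil => simp [frank]
  | cons p rest ih =>
    obtain ⟨i, n⟩ := p
    by_cases h : n = m
    · subst h
      simp [frank]
    · have h' : ¬ m = n := fun e => h e.symm
      simp [frank, h, h', ih]

theorem shGo_mem (g : String → Option (List String)) :
    ∀ (l : List (Int × String)) (seen : List String) (e : Int × String × List String),
      e ∈ shGo g seen l → e.2.1 ∉ seen ∧ frank l e.2.1 = some e.1 ∧ g e.2.1 = some e.2.2
  | [], _, e => by simp [shGo]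
  | (i, n) :: rest, seen, e => by
    intro he
    by_cases hn : n ∈ seen
    · simp only [shGo, if_pos hn] at he
      obtain ⟨h1, h2, h3⟩ := shGo_mem g rest seen e he
      refine ⟨h1, ?_, h3⟩
      have hne : n ≠ e.2.1 := fun hx => h1 (hx ▸ hn)
      simp only [frank, if_neg hne]
      exact h2
    · cases hg : g n with
      | none =>
        simp only [shGo, if_neg hn, hg] at he
        obtain ⟨h1, h2, h3⟩ := shGo_mem g rest seen e he
        refine ⟨h1, ?_, h3⟩
        have hne : n ≠ e.2.1 := by
          intro hx
          rw [hx, h3] at hg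
          simp at hg
        simp only [frank, if_neg hne]
        exact h2
      | some v =>
        simp only [shGo, if_neg hn, hg, List.mem_cons] at he
        rcases he with rfl | he
        · exact ⟨hn, by simp [frank], hg⟩
        · obtain ⟨h1, h2, h3⟩ := shGo_mem g rest (n :: seen) e he
          have hne : e.2.1 ≠ n := fun hx => h1 (hx ▸ List.mem_cons_self)
          refine ⟨fun hx => h1 (List.mem_cons_of_mem _ hx), ?_, h3⟩
          simp only [frank, if_neg (fun h : n = e.2.1 => hne h.symm)]
          exact h2

theorem shGo_names_nodup (g : String → Option (List String)) :
    ∀ (l : List (Int × String)) (seen : List String), ((shGo g seen l).map (·.2.1)).Nodup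
  | [], _ => by simp [shGo]
  | (i, n) :: rest, seen => by
    by_cases hn : n ∈ seen
    · simpa only [shGo, if_pos hn] using shGo_names_nodup g rest seen
    · cases hg : g n with
      | none => simpa only [shGo, if_neg hn, hg] using shGo_names_nodup g rest seen
      | some v =>
        simp only [shGo, if_neg hn, hg, List.map_cons, List.nodup_cons]
        refine ⟨?_, shGo_names_nodup g rest (n :: seen)⟩
        intro hmem
        rcases List.mem_map.mp hmem with ⟨e, he, hne⟩
        exact (shGo_mem g rest (n :: seen) e he).1 (hne ▸ List.mem_cons_self)

theorem shGo_names_mem (g : String → Option (List String)) :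
    ∀ (l : List (Int × String)) (seen : List String) (n : String),
      n ∈ (shGo g seen l).map (·.2.1) ↔ n ∉ seen ∧ n ∈ l.map (·.2) ∧ (g n).isSome
  | [], seen, n => by simp [shGo]
  | (i, m) :: rest, seen, n => by
    by_cases hm : m ∈ seen
    · simp only [shGo, if_pos hm, List.map_cons, List.mem_cons]
      rw [shGo_names_mem g rest seen n]
      constructor
      · rintro ⟨h1, h2, h3⟩
        exact ⟨h1, Or.inr h2, h3⟩
      · rintro ⟨h1, h2, h3⟩
        refine ⟨h1, ?_, h3⟩
        rcases h2 with rfl | h2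
        · exact absurd hm h1
        · exact h2
    · cases hg : g m with
      | none =>
        simp only [shGo, if_neg hm, hg, List.map_cons, List.mem_cons]
        rw [shGo_names_mem g rest seen n]
        constructor
        · rintro ⟨h1, h2, h3⟩
          exact ⟨h1, Or.inr h2, h3⟩
        · rintro ⟨h1, h2, h3⟩
          refine ⟨h1, ?_, h3⟩
          rcases h2 with rfl | h2
          · rw [hg] at h3
            exact absurd h3 (by simp)
          · exact h2
      | some v =>
        simp only [shGo, if_neg hm, hg, List.map_cons, List.mem_cons]
        rw [shGo_names_mem g rest (m :: seen) n]
        constructor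
        · rintro (rfl | ⟨h1, h2, h3⟩)
          · exact ⟨hm, Or.inl rfl, by rw [hg]; rfl⟩
          · exact ⟨fun hs => h1 (List.mem_cons_of_mem _ hs), Or.inr h2, h3⟩
        · rintro ⟨h1, h2, h3⟩
          by_cases hnm : n = m
          · exact Or.inl hnm
          · rcases h2 with rfl | h2
            · exact absurd rfl hnm
            · exact Or.inr ⟨by simp [List.mem_cons, hnm, h1], h2, h3⟩

theorem shGo_fst_sublist (g : String → Option (List String)) :
    ∀ (l : List (Int × String)) (seen : List String),
      ((shGo g seen l).map (·.1)).Sublist (l.map (·.1))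
  | [], _ => by simp [shGo]
  | (i, n) :: rest, seen => by
    by_cases hn : n ∈ seen
    · simp only [shGo, if_pos hn, List.map_cons]
      exact (shGo_fst_sublist g rest seen).cons _
    · cases hg : g n with
      | none =>
        simp only [shGo, if_neg hn, hg, List.map_cons]
        exact (shGo_fst_sublist g rest seen).cons _
      | some v =>
        simp only [shGo, if_neg hn, hg, List.map_cons]
        exact (shGo_fst_sublist g rest (n :: seen)).cons₂ _

theorem eq_map_proj {α β : Type} (xs : List α) (proj : α → β) (F : β → α)
    (h : ∀ e ∈ xs, F (proj e) = e) : xs = (xs.map proj).map F := by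
  rw [List.map_map]
  calc xs = xs.map id := (List.map_id xs).symm
    _ = xs.map (F ∘ proj) := List.map_congr_left (fun e he => (h e he).symm)

theorem filterMap_map_sublist {α β γ : Type} (f : α → Option β) (p1 : α → γ) (p2 : β → γ)
    (h : ∀ a b, f a = some b → p2 b = p1 a) (xs : List α) :
    ((xs.filterMap f).map p2).Sublist (xs.map p1) := by
  induction xs with
  | nil => simp
  | cons a rest ih =>
    cases hfa : f a with
    | none =>
      simp only [List.filterMap_cons, hfa, List.map_cons]
      exact ih.cons _
    | some b =>
      simp only [List.filterMap_cons, hfa, List.map_cons]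
      rw [h a b hfa]
      exact ih.cons₂ _

-- ===== VERDICT (by name: the statement is the Claim_ definition above) =====
theorem select_headers_spec : Claim_equal_select_headers := by
  unfold Claim_equal_select_headers
  intro headers allowed _hdom hpre
  unfold Spec_select_headers
  cases headers with
  | none => rfl
  | some hs =>
    by_cases hemp : hs.isEmpty
    · simp [select_headers, select_headers_alt, hemp]
    · have hnd : (hs.map Prod.fst).Nodup := hpre
      have hkeysmk : (PySem.Dict.mk hs).keys = hs.map Prod.fst := rfl
      have hg_of_mem : ∀ kv ∈ hs, (PySem.Dict.mk hs).get? kv.1 = some kv.2 := by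
        intro kv hkv
        have hkv' : (kv.1, kv.2) ∈ (PySem.Dict.mk hs).items := by simpa using hkv
        exact PySem.Dict.get?_of_mem_items _ hkv' (by rw [hkeysmk]; exact hnd)
      have hg_isSome : ∀ n, ((PySem.Dict.mk hs).get? n).isSome ↔ n ∈ hs.map Prod.fst := by
        intro n
        rw [← hkeysmk, ← Option.ne_none_iff_isSome]
        constructor
        · intro h
          by_contra hmem
          exact h ((PySem.Dict.get?_eq_none_iff_not_mem_keys _ _).mpr hmem)
        · intro hmem h
          exact (PySem.Dict.get?_eq_none_iff_not_mem_keys _ _).mp h hmem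
      have hR : ∀ n, ((PySem.List.enumerate allowed).foldl
            (fun r p => if r.contains p.2 then r else r.insert p.2 p.1) PySem.Dict.empty).get? n
          = frank (PySem.List.enumerate allowed) n := by
        intro n
        rw [rank_get]
        rw [PySem.Dict.get?_empty]
      have hpicked_mem : ∀ e ∈ hs.filterMap (fun kv =>
            match ((PySem.List.enumerate allowed).foldl
              (fun r p => if r.contains p.2 then r else r.insert p.2 p.1) PySem.Dict.empty).get? kv.1 with
            | some i => some (i, kv.1, kv.2)
            | none => none),
          frank (PySem.List.enumerate allowed) e.2.1 = some e.1
            ∧ (PySem.Dict.mk hs).get? e.2.1 = some e.2.2 := by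
        intro e he
        rcases List.mem_filterMap.mp he with ⟨kv, hkv, hfe⟩
        cases hri : ((PySem.List.enumerate allowed).foldl
            (fun r p => if r.contains p.2 then r else r.insert p.2 p.1) PySem.Dict.empty).get? kv.1 with
        | none => rw [hri] at hfe; exact absurd hfe (by simp)
        | some i =>
          simp only [hri] at hfe
          injection hfe with hfe
          subst hfe
          exact ⟨by rw [← hR kv.1]; exact hri, hg_of_mem kv hkv⟩
      have hpicked_names_sub : ((hs.filterMap (fun kv =>
            match ((PySem.List.enumerate allowed).foldl
              (fun r p => if r.contains p.2 then r else r.insert p.2 p.1) PySem.Dict.empty).get? kv.1 with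
            | some i => some (i, kv.1, kv.2)
            | none => none)).map (·.2.1)).Sublist (hs.map Prod.fst) := by
        apply filterMap_map_sublist
        intro a b hab
        cases hri : ((PySem.List.enumerate allowed).foldl
            (fun r p => if r.contains p.2 then r else r.insert p.2 p.1) PySem.Dict.empty).get? a.1 with
        | none => rw [hri] at hab; exact absurd hab (by simp)
        | some i =>
          simp only [hri] at hab
          injection hab with hab
          subst hab
          rfl
      have hpicked_names_nodup := List.Nodup.sublist hpicked_names_sub hnd
      have hpicked_names_mem : ∀ n, n ∈ (hs.filterMap (fun kv =>
            match ((PySem.List.enumerate allowed).foldl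
              (fun r p => if r.contains p.2 then r else r.insert p.2 p.1) PySem.Dict.empty).get? kv.1 with
            | some i => some (i, kv.1, kv.2)
            | none => none)).map (·.2.1)
          ↔ (n ∈ hs.map Prod.fst ∧ n ∈ allowed) := by
        intro n
        constructor
        · intro h
          rcases List.mem_map.mp h with ⟨e, he, hen⟩
          subst hen
          rcases List.mem_filterMap.mp he with ⟨kv, hkv, hfe⟩
          cases hri : ((PySem.List.enumerate allowed).foldl
              (fun r p => if r.contains p.2 then r else r.insert p.2 p.1) PySem.Dict.empty).get? kv.1 with
          | none => rw [hri] at hfe; exact absurd hfe (by simp)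
          | some i =>
            simp only [hri] at hfe
            injection hfe with hfe
            subst hfe
            constructor
            · exact List.mem_map.mpr ⟨kv, hkv, rfl⟩
            · have hfs : (frank (PySem.List.enumerate allowed) kv.1).isSome := by
                rw [← hR kv.1, hri]
                rfl
              have hmem := (frank_isSome _ _).mp hfs
              simpa [PySem.List.map_snd_enumerate] using hmem
        · rintro ⟨h1, h2⟩
          rcases List.mem_map.mp h1 with ⟨kv, hkv, hkn⟩
          subst hkn
          apply List.mem_map.mpr
          have hsome : (((PySem.List.enumerate allowed).foldl
              (fun r p => if r.contains p.2 then r else r.insert p.2 p.1) PySem.Dict.empty).get? kv.1).isSome := by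
            rw [hR kv.1, frank_isSome]
            simpa [PySem.List.map_snd_enumerate] using h2
          cases hri : ((PySem.List.enumerate allowed).foldl
              (fun r p => if r.contains p.2 then r else r.insert p.2 p.1) PySem.Dict.empty).get? kv.1 with
          | none => rw [hri] at hsome; exact absurd hsome (by simp)
          | some i =>
            exact ⟨(i, kv.1, kv.2), List.mem_filterMap.mpr ⟨kv, hkv, by rw [hri]⟩, rfl⟩
      have hE_eq : shGo ((PySem.Dict.mk hs).get?) [] (PySem.List.enumerate allowed)
          = ((shGo ((PySem.Dict.mk hs).get?) [] (PySem.List.enumerate allowed)).map (·.2.1)).map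
              (fun n => (((((PySem.List.enumerate allowed).foldl
                (fun r p => if r.contains p.2 then r else r.insert p.2 p.1) PySem.Dict.empty).get? n).getD 0 : Int), n,
                (((PySem.Dict.mk hs).get? n).getD ([] : List String)))) := by
        apply eq_map_proj
        intro e he
        obtain ⟨_, h2, h3⟩ := shGo_mem _ _ _ e he
        rw [hR, h2, h3]
        rfl
      have hpicked_eq : hs.filterMap (fun kv =>
            match ((PySem.List.enumerate allowed).foldl
              (fun r p => if r.contains p.2 then r else r.insert p.2 p.1) PySem.Dict.empty).get? kv.1 with
            | some i => some (i, kv.1, kv.2)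
            | none => none)
          = ((hs.filterMap (fun kv =>
            match ((PySem.List.enumerate allowed).foldl
              (fun r p => if r.contains p.2 then r else r.insert p.2 p.1) PySem.Dict.empty).get? kv.1 with
            | some i => some (i, kv.1, kv.2)
            | none => none)).map (·.2.1)).map
              (fun n => (((((PySem.List.enumerate allowed).foldl
                (fun r p => if r.contains p.2 then r else r.insert p.2 p.1) PySem.Dict.empty).get? n).getD 0 : Int), n,
                (((PySem.Dict.mk hs).get? n).getD ([] : List String)))) := by
        apply eq_map_proj
        intro e he
        obtain ⟨h2, h3⟩ := hpicked_mem e he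
        rw [hR, h2, h3]
        rfl
      have hnames_perm : ((shGo ((PySem.Dict.mk hs).get?) [] (PySem.List.enumerate allowed)).map (·.2.1)).Perm
          ((hs.filterMap (fun kv =>
            match ((PySem.List.enumerate allowed).foldl
              (fun r p => if r.contains p.2 then r else r.insert p.2 p.1) PySem.Dict.empty).get? kv.1 with
            | some i => some (i, kv.1, kv.2)
            | none => none)).map (·.2.1)) := by
        apply (List.perm_ext_iff_of_nodup (shGo_names_nodup _ _ _) hpicked_names_nodup).mpr
        intro n
        rw [hpicked_names_mem n, shGo_names_mem, hg_isSome n]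
        simp only [PySem.List.map_snd_enumerate, List.not_mem_nil, not_false_iff, true_and]
        tauto
      have hperm : (shGo ((PySem.Dict.mk hs).get?) [] (PySem.List.enumerate allowed)).Perm
          (hs.filterMap (fun kv =>
            match ((PySem.List.enumerate allowed).foldl
              (fun r p => if r.contains p.2 then r else r.insert p.2 p.1) PySem.Dict.empty).get? kv.1 with
            | some i => some (i, kv.1, kv.2)
            | none => none)) := by
        rw [hE_eq, hpicked_eq]
        exact hnames_perm.map _
      have hpw : (shGo ((PySem.Dict.mk hs).get?) [] (PySem.List.enumerate allowed)).Pairwise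
          (fun a b => a.1 < b.1) := by
        have h1 : ((PySem.List.enumerate allowed).map (·.1)).Pairwise (· < ·) :=
          (List.pairwise_map).mpr (PySem.List.pairwise_lt_enumerate allowed 0)
        have h2 := List.Pairwise.sublist
          (shGo_fst_sublist ((PySem.Dict.mk hs).get?) (PySem.List.enumerate allowed) []) h1
        exact (List.pairwise_map).mp h2
      have hsorted := PySem.List.sorted_eq_of_perm_of_pairwise_lt _ _ (fun e => e.1) hperm hpw
      have hA : select_headers (some hs) allowed
          = (shGo ((PySem.Dict.mk hs).get?) [] (PySem.List.enumerate allowed)).map (·.2) := by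
        simp only [select_headers]
        rw [if_neg hemp]
        simp only [map_ident]
        refine Eq.trans (A_loop ((PySem.Dict.mk hs).get?) allowed 0 PySem.Dict.empty
          (by simp [PySem.Dict.keys_empty]) (by intro p hp; simp [PySem.Dict.empty] at hp)) ?_
        simp [PySem.Dict.keys_empty, PySem.Dict.empty]
      have hB : select_headers_alt (some hs) allowed
          = (shGo ((PySem.Dict.mk hs).get?) [] (PySem.List.enumerate allowed)).map (·.2) := by
        simp only [select_headers_alt]
        rw [if_neg hemp]
        simp only [map_ident]
        rw [hsorted]
        refine Eq.trans (PySem.Dict.items_foldl_insert_fresh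
          (shGo ((PySem.Dict.mk hs).get?) [] (PySem.List.enumerate allowed))
          (fun e => e.2.1) (fun e => e.2.2)
          PySem.Dict.empty
          (by intro e he; exact PySem.Dict.contains_empty _)
          (shGo_names_nodup _ _ _)) ?_
        simp [PySem.Dict.empty]
      rw [hA, hB]
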